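-- pv_equiv track=rewrite | github.com/Oreo-Monster/pycoMouse | floodfill.py | get_min_neighbors
-- ===== SOURCE A (Python) =====
-- def get_min_neighbors(maze, cell, ignoreVisited=False):
--     i, j = cell
--     neighbors = []
--     min_dist = 10000
--     direction = -1
--     i_addition = [-1, 0, 1, 0]
--     j_addition = [0, 1, 0, -1]
--     tied_cells = [] #List of cells with the same distance as the minimum distance
--     for k in range(4):
--         if maze[i][j][1] & 2**k:
--             #Wall
--             continue
--         else:
--             #Open
--             if ignoreVisited and maze[i+i_addition[k]][j+j_addition[k]][1] & 16:
--                 #Visited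
--                 continue
--             else:
--                 neighbors.append((i+i_addition[k], j+j_addition[k]))
--
--             if maze[i+i_addition[k]][j+j_addition[k]][0] < min_dist: #new minimum distance
--                 min_dist = maze[i+i_addition[k]][j+j_addition[k]][0]
--                 direction = k
--                 tied_cells = []
--             if maze[i+i_addition[k]][j+j_addition[k]][0] == min_dist:
--                 #Same distance
--                 tied_cells.append((i+i_addition[k], j+j_addition[k]))
--
--     return min_dist, direction, neighbors, tied_cells
-- ===== SOURCE B (Python) =====
-- def get_min_neighbors(maze, cell, ignoreVisited=False):
--     i, j = cell
--     offsets = [(-1, 0), (0, 1), (1, 0), (0, -1)]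
--     entries = []
--     for k in range(4):
--         if maze[i][j][1] & 2 ** k:
--             continue  # wall
--         ni, nj = i + offsets[k][0], j + offsets[k][1]
--         if ignoreVisited and maze[ni][nj][1] & 16:
--             continue  # visited
--         entries.append((k, (ni, nj), maze[ni][nj][0]))
--     min_dist = min([d for _, _, d in entries] + [10000])
--     direction = next((k for k, _, d in entries if d == min_dist), -1) if min_dist < 10000 else -1
--     neighbors = [c for _, c, _ in entries]
--     tied_cells = [c for _, c, d in entries if d == min_dist]
--     return min_dist, direction, neighbors, tied_cells
-- ===== Notes on version B (the rewrite author's own statement) =====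
-- stated objective: alternative
-- what changed: Replaces A's single running-minimum loop with mutable reset/append state by a collect-then-aggregate decomposition: one pass gathers the valid (k, cell, dist) entries, then min/first-match/filter passes derive min_dist, direction, neighbors and tied_cells.
import Mathlib
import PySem

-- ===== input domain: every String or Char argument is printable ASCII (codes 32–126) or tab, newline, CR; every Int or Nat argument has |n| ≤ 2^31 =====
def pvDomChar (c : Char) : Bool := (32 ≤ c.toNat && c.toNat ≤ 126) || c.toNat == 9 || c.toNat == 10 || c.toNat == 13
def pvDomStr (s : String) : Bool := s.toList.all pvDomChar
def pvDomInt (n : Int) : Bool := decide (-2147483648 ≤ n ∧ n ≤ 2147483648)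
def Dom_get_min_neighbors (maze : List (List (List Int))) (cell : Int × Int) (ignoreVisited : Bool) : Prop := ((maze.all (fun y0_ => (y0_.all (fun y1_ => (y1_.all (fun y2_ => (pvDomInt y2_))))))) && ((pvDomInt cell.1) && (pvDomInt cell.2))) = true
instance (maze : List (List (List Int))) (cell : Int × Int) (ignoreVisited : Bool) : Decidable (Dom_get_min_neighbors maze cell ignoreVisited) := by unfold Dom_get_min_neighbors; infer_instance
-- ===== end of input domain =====

-- B replaces A's running-minimum loop (with reset/append state) by a collect-then-aggregate
-- decomposition: gather valid (k, cell, dist) entries, then derive the four results by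
-- min / first-match / filter passes. Same value on every input where A returns (Pre_).


-- shared indexing helper: maze[a][b][c] (none = IndexError, Python negative-index rule)
def pvGet3 (maze : List (List (List Int))) (a b c : Int) : Option Int :=
  (PySem.List.pyGet? maze a).bind fun r =>
    (PySem.List.pyGet? r b).bind fun cc => PySem.List.pyGet? cc c

-- ===== PORT A =====
-- literal transliteration of A: fold over range(4) carrying (min_dist, direction, neighbors, tied_cells);
-- indexing uses pvGet3 (.getD 0 is never reached under Pre_)
def get_min_neighbors (maze : List (List (List Int))) (cell : Int × Int) (ignoreVisited : Bool) : Int × Int × (List (Int × Int)) × (List (Int × Int)) :=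
  let i := cell.1
  let j := cell.2
  let i_addition : List Int := [-1, 0, 1, 0]
  let j_addition : List Int := [0, 1, 0, -1]
  (PySem.List.pyRange 0 4 1).foldl
    (fun st k =>
      let min_dist := st.1
      let direction := st.2.1
      let neighbors := st.2.2.1
      let tied_cells := st.2.2.2
      if PySem.Int.band ((pvGet3 maze i j 1).getD 0) (2 ^ k.toNat) ≠ 0 then
        st  -- wall: continue
      else
        let ni := i + (PySem.List.pyGet? i_addition k).getD 0
        let nj := j + (PySem.List.pyGet? j_addition k).getD 0
        if ignoreVisited ∧ PySem.Int.band ((pvGet3 maze ni nj 1).getD 0) 16 ≠ 0 then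
          st  -- visited: continue
        else
          let neighbors := neighbors ++ [(ni, nj)]
          let d := (pvGet3 maze ni nj 0).getD 0
          let st2 : Int × Int × List (Int × Int) :=
            if d < min_dist then (d, k, []) else (min_dist, direction, tied_cells)
          let min_dist := st2.1
          let direction := st2.2.1
          let tied_cells := st2.2.2
          let tied_cells := if d = min_dist then tied_cells ++ [(ni, nj)] else tied_cells
          (min_dist, direction, neighbors, tied_cells))
    (10000, -1, [], [])

-- ===== PORT B =====
-- literal transliteration of Source B: collect entries, then aggregate
def get_min_neighbors_alt (maze : List (List (List Int))) (cell : Int × Int) (ignoreVisited : Bool) : Int × Int × (List (Int × Int)) × (List (Int × Int)) :=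
  let i := cell.1
  let j := cell.2
  let offsets : List (Int × Int) := [(-1, 0), (0, 1), (1, 0), (0, -1)]
  let entries : List (Int × (Int × Int) × Int) :=
    (PySem.List.pyRange 0 4 1).filterMap fun k =>
      if PySem.Int.band ((pvGet3 maze i j 1).getD 0) (2 ^ k.toNat) ≠ 0 then
        none  -- wall
      else
        let off := (PySem.List.pyGet? offsets k).getD (0, 0)
        let ni := i + off.1
        let nj := j + off.2
        if ignoreVisited ∧ PySem.Int.band ((pvGet3 maze ni nj 1).getD 0) 16 ≠ 0 then
          none  -- visited
        else
          some (k, (ni, nj), (pvGet3 maze ni nj 0).getD 0)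
  let min_dist := (PySem.List.min? (entries.map (fun e => e.2.2) ++ [10000]) (fun x => x)).getD 0
  let direction :=
    if min_dist < 10000 then
      ((entries.find? (fun e => e.2.2 == min_dist)).map (fun e => e.1)).getD (-1)
    else (-1)
  let neighbors := entries.map (fun e => e.2.1)
  let tied_cells := (entries.filter (fun e => e.2.2 == min_dist)).map (fun e => e.2.1)
  (min_dist, direction, neighbors, tied_cells)

-- ===== PRECONDITION & SPEC =====
-- neighbor access (ni,nj) succeeds exactly as A performs it: with ignoreVisited, [1] is read
-- first and [0] only when the visited bit is clear; without, only [0] is read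
def pvNbrOk (maze : List (List (List Int))) (ni nj : Int) (ignoreVisited : Bool) : Bool :=
  if ignoreVisited then
    (pvGet3 maze ni nj 1).isSome &&
    (PySem.Int.band ((pvGet3 maze ni nj 1).getD 0) 16 != 0 || (pvGet3 maze ni nj 0).isSome)
  else
    (pvGet3 maze ni nj 0).isSome

-- direction k is a wall, or its neighbor accesses succeed
def pvDirOk (maze : List (List (List Int))) (i j w : Int) (k : Nat) (di dj : Int) (ignoreVisited : Bool) : Bool :=
  PySem.Int.band w (2 ^ k) != 0 || pvNbrOk maze (i + di) (j + dj) ignoreVisited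

-- exactly the inputs on which A returns (no IndexError): the home cell's wall word exists and
-- every non-wall direction's neighbor reads succeed
def Pre_get_min_neighbors (maze : List (List (List Int))) (cell : Int × Int) (ignoreVisited : Bool) : Prop :=
  (pvGet3 maze cell.1 cell.2 1).isSome = true ∧
  pvDirOk maze cell.1 cell.2 ((pvGet3 maze cell.1 cell.2 1).getD 0) 0 (-1) 0 ignoreVisited = true ∧
  pvDirOk maze cell.1 cell.2 ((pvGet3 maze cell.1 cell.2 1).getD 0) 1 0 1 ignoreVisited = true ∧
  pvDirOk maze cell.1 cell.2 ((pvGet3 maze cell.1 cell.2 1).getD 0) 2 1 0 ignoreVisited = true ∧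
  pvDirOk maze cell.1 cell.2 ((pvGet3 maze cell.1 cell.2 1).getD 0) 3 0 (-1) ignoreVisited = true
instance (maze : List (List (List Int))) (cell : Int × Int) (ignoreVisited : Bool) : Decidable (Pre_get_min_neighbors maze cell ignoreVisited) := by unfold Pre_get_min_neighbors; infer_instance

def pvWitness_get_min_neighbors : List (List (List Int)) × (Int × Int) × Bool :=
  ([[[0, 15]]], (0, 0), false)

def Spec_get_min_neighbors (maze : List (List (List Int))) (cell : Int × Int) (ignoreVisited : Bool) (out : Int × Int × (List (Int × Int)) × (List (Int × Int))) : Prop := out = get_min_neighbors_alt maze cell ignoreVisited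
instance (maze : List (List (List Int))) (cell : Int × Int) (ignoreVisited : Bool) (out : Int × Int × (List (Int × Int)) × (List (Int × Int))) : Decidable (Spec_get_min_neighbors maze cell ignoreVisited out) := by unfold Spec_get_min_neighbors; infer_instance

-- ===== CLAIM (what is proved, stated in full; the proofs are below) =====
def Claim_equal_get_min_neighbors : Prop := ∀ (maze : List (List (List Int))) (cell : Int × Int) (ignoreVisited : Bool), Dom_get_min_neighbors maze cell ignoreVisited → Pre_get_min_neighbors maze cell ignoreVisited → Spec_get_min_neighbors maze cell ignoreVisited (get_min_neighbors maze cell ignoreVisited)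

-- ===== LEMMAS AND PROOFS =====

-- A's loop body as a named function (definitionally the fold step of the port of A)
def pvStepA (maze : List (List (List Int))) (i j : Int) (ignoreVisited : Bool)
    (st : Int × Int × (List (Int × Int)) × (List (Int × Int))) (k : Int) :
    Int × Int × (List (Int × Int)) × (List (Int × Int)) :=
  let min_dist := st.1
  let direction := st.2.1
  let neighbors := st.2.2.1
  let tied_cells := st.2.2.2
  if PySem.Int.band ((pvGet3 maze i j 1).getD 0) (2 ^ k.toNat) ≠ 0 then
    st
  else
    let ni := i + (PySem.List.pyGet? ([-1, 0, 1, 0] : List Int) k).getD 0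
    let nj := j + (PySem.List.pyGet? ([0, 1, 0, -1] : List Int) k).getD 0
    if ignoreVisited ∧ PySem.Int.band ((pvGet3 maze ni nj 1).getD 0) 16 ≠ 0 then
      st
    else
      let neighbors := neighbors ++ [(ni, nj)]
      let d := (pvGet3 maze ni nj 0).getD 0
      let st2 : Int × Int × List (Int × Int) :=
        if d < min_dist then (d, k, []) else (min_dist, direction, tied_cells)
      let min_dist := st2.1
      let direction := st2.2.1
      let tied_cells := st2.2.2
      let tied_cells := if d = min_dist then tied_cells ++ [(ni, nj)] else tied_cells
      (min_dist, direction, neighbors, tied_cells)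

-- B's entry producer as a named function (definitionally the filterMap body of the port of B)
def pvFB (maze : List (List (List Int))) (i j : Int) (ignoreVisited : Bool) (k : Int) :
    Option (Int × (Int × Int) × Int) :=
  if PySem.Int.band ((pvGet3 maze i j 1).getD 0) (2 ^ k.toNat) ≠ 0 then
    none
  else
    let off := (PySem.List.pyGet? ([(-1, 0), (0, 1), (1, 0), (0, -1)] : List (Int × Int)) k).getD (0, 0)
    let ni := i + off.1
    let nj := j + off.2
    if ignoreVisited ∧ PySem.Int.band ((pvGet3 maze ni nj 1).getD 0) 16 ≠ 0 then
      none
    else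
      some (k, (ni, nj), (pvGet3 maze ni nj 0).getD 0)

def pvMd (E : List (Int × (Int × Int) × Int)) : Int :=
  (PySem.List.min? (E.map (fun e => e.2.2) ++ [10000]) (fun x => x)).getD 0

-- B's aggregation of a list of entries (definitionally B's result on those entries)
def pvAgg (E : List (Int × (Int × Int) × Int)) :
    Int × Int × (List (Int × Int)) × (List (Int × Int)) :=
  (pvMd E,
   (if pvMd E < 10000 then
      ((E.find? (fun e => e.2.2 == pvMd E)).map (fun e => e.1)).getD (-1)
    else (-1)),
   E.map (fun e => e.2.1),
   (E.filter (fun e => e.2.2 == pvMd E)).map (fun e => e.2.1))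

theorem pvA_eq (maze : List (List (List Int))) (cell : Int × Int) (ignoreVisited : Bool) :
    get_min_neighbors maze cell ignoreVisited =
      (PySem.List.pyRange 0 4 1).foldl (pvStepA maze cell.1 cell.2 ignoreVisited)
        (10000, -1, [], []) := rfl

theorem pvB_eq (maze : List (List (List Int))) (cell : Int × Int) (ignoreVisited : Bool) :
    get_min_neighbors_alt maze cell ignoreVisited =
      pvAgg ((PySem.List.pyRange 0 4 1).filterMap (pvFB maze cell.1 cell.2 ignoreVisited)) := rfl

theorem pvFoldMin (t : List Int) (a b : Int) :
    min (t.foldl min a) b = t.foldl min (min b a) := by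
  induction t generalizing a with
  | nil => simp [min_comm]
  | cons y t ih =>
      simp only [List.foldl_cons]
      rw [ih]
      congr 1
      rw [min_assoc]

theorem pvMinval (l : List Int) (b : Int) :
    (PySem.List.min? (l ++ [b]) (fun x => x)).getD 0 = l.foldl min b := by
  cases l with
  | nil => simp [PySem.List.min?_id_cons]
  | cons x t =>
      rw [List.cons_append, PySem.List.min?_id_cons, Option.getD_some, List.foldl_append]
      simp only [List.foldl_cons, List.foldl_nil]
      exact pvFoldMin t x b

theorem pvMd_foldl (E : List (Int × (Int × Int) × Int)) :
    pvMd E = (E.map (fun e => e.2.2)).foldl min 10000 := pvMinval _ _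

theorem pvFoldMin_le_init (l : List Int) (a : Int) : l.foldl min a ≤ a := by
  induction l generalizing a with
  | nil => simp
  | cons x t ih => exact le_trans (ih (min a x)) (min_le_left a x)

theorem pvFoldMin_le_mem (l : List Int) : ∀ (a x : Int), x ∈ l → l.foldl min a ≤ x := by
  induction l with
  | nil => intro a x hx; cases hx
  | cons y t ih =>
      intro a x hx
      rcases List.mem_cons.mp hx with rfl | h
      · exact le_trans (pvFoldMin_le_init t (min a x)) (min_le_right a x)
      · exact ih (min a y) x h

theorem pvFoldMin_cases (l : List Int) : ∀ (a : Int),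
    l.foldl min a = a ∨ l.foldl min a ∈ l := by
  induction l with
  | nil => exact fun a => Or.inl rfl
  | cons y t ih =>
      intro a
      simp only [List.foldl_cons]
      rcases ih (min a y) with h | h
      · rw [h]
        rcases le_total a y with hay | hay
        · exact Or.inl (min_eq_left hay)
        · refine Or.inr ?_
          rw [min_eq_right hay]
          exact List.mem_cons_self ..
      · exact Or.inr (List.mem_cons_of_mem y h)

theorem pvMd_le (E : List (Int × (Int × Int) × Int)) : pvMd E ≤ 10000 := by
  rw [pvMd_foldl]; exact pvFoldMin_le_init _ _

theorem pvMd_min (E : List (Int × (Int × Int) × Int)) (e : Int × (Int × Int) × Int)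
    (he : e ∈ E) : pvMd E ≤ e.2.2 := by
  rw [pvMd_foldl]
  exact pvFoldMin_le_mem _ _ _ (List.mem_map_of_mem he)

theorem pvMd_mem (E : List (Int × (Int × Int) × Int)) (h : pvMd E < 10000) :
    ∃ e ∈ E, e.2.2 = pvMd E := by
  rw [pvMd_foldl] at h ⊢
  rcases pvFoldMin_cases (E.map (fun e => e.2.2)) 10000 with h' | h'
  · omega
  · rcases List.mem_map.mp h' with ⟨e, he, hv⟩
    exact ⟨e, he, hv⟩

theorem pvMd_append (E : List (Int × (Int × Int) × Int)) (e : Int × (Int × Int) × Int) :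
    pvMd (E ++ [e]) = min (pvMd E) e.2.2 := by
  rw [pvMd_foldl, pvMd_foldl, List.map_append, List.foldl_append]
  rfl

theorem pvFilterMap_cons {α β : Type} (f : α → Option β) (a : α) (l : List α) :
    List.filterMap f (a :: l) = (f a).toList ++ List.filterMap f l := by
  cases h : f a <;> simp [h]

theorem pvStep_eq (maze : List (List (List Int))) (i j : Int) (iv : Bool)
    (E : List (Int × (Int × Int) × Int)) (k : Int)
    (hk : k = 0 ∨ k = 1 ∨ k = 2 ∨ k = 3) :
    pvStepA maze i j iv (pvAgg E) k = pvAgg (E ++ (pvFB maze i j iv k).toList) := by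
  have hfst : (PySem.List.pyGet? ([-1, 0, 1, 0] : List Int) k).getD 0 =
      ((PySem.List.pyGet? ([(-1, 0), (0, 1), (1, 0), (0, -1)] : List (Int × Int)) k).getD (0, 0)).1 := by
    rcases hk with rfl | rfl | rfl | rfl <;> decide
  have hsnd : (PySem.List.pyGet? ([0, 1, 0, -1] : List Int) k).getD 0 =
      ((PySem.List.pyGet? ([(-1, 0), (0, 1), (1, 0), (0, -1)] : List (Int × Int)) k).getD (0, 0)).2 := by
    rcases hk with rfl | rfl | rfl | rfl <;> decide
  unfold pvStepA pvFB
  rw [hfst, hsnd]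
  set off := (PySem.List.pyGet? ([(-1, 0), (0, 1), (1, 0), (0, -1)] : List (Int × Int)) k).getD (0, 0) with hoff
  by_cases hw : PySem.Int.band ((pvGet3 maze i j 1).getD 0) (2 ^ k.toNat) ≠ 0
  · simp [hw]
  · simp only [hw, if_false]
    set ni := i + off.1 with hni
    set nj := j + off.2 with hnj
    by_cases hv : iv = true ∧ PySem.Int.band ((pvGet3 maze ni nj 1).getD 0) 16 ≠ 0
    · rw [if_pos hv, if_pos hv]
      simp
    · rw [if_neg hv, if_neg hv]
      simp only [Option.toList]
      set d := (pvGet3 maze ni nj 0).getD 0 with hd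
      have hmd_le := pvMd_le E
      have hmin1 : pvMd (E ++ [(k, (ni, nj), d)]) = min (pvMd E) d := pvMd_append E _
      by_cases h1 : d < pvMd E
      · -- strict improvement: new minimum d, direction k, tied = [cell]
        have hmin : pvMd (E ++ [(k, (ni, nj), d)]) = d := by rw [hmin1]; omega
        have hd10 : d < 10000 := lt_of_lt_of_le h1 hmd_le
        have hnone : E.find? (fun e => e.2.2 == d) = none := by
          rw [List.find?_eq_none]
          intro e he
          have := pvMd_min E e he
          simp only [beq_iff_eq]
          omega
        have hfilt : E.filter (fun e => e.2.2 == d) = [] := by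
          rw [List.filter_eq_nil_iff]
          intro e he
          have := pvMd_min E e he
          simp only [beq_iff_eq]
          omega
        simp only [pvAgg, hmin, if_pos h1]
        simp [List.find?_append, hnone, List.filter_append, hfilt, hd10]
      · -- no improvement: minimum unchanged
        have hmin : pvMd (E ++ [(k, (ni, nj), d)]) = pvMd E := by rw [hmin1]; omega
        simp only [pvAgg, hmin, if_neg h1]
        by_cases h3 : d = pvMd E
        · -- tie with the current minimum: appended to tied_cells, direction kept
          by_cases h4 : pvMd E < 10000
          · obtain ⟨e0, he0, hv0⟩ := pvMd_mem E h4
            have hsome : (E.find? (fun e => e.2.2 == pvMd E)).isSome := by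
              rw [List.find?_isSome]
              exact ⟨e0, he0, by simp [hv0]⟩
            obtain ⟨a0, ha0⟩ := Option.isSome_iff_exists.mp hsome
            simp [List.find?_append, ha0, List.filter_append, h3, h4]
          · simp [List.filter_append, h3, h4]
        · -- strictly larger: only neighbors grows
          have hb : (d == pvMd E) = false := beq_eq_false_iff_ne.mpr h3
          have hfind1 : List.find? (fun e => e.2.2 == pvMd E)
              [((k, (ni, nj), d) : Int × (Int × Int) × Int)] = none := by
            simp [List.find?, hb]
          have hfilt1 : List.filter (fun e => e.2.2 == pvMd E)
              [((k, (ni, nj), d) : Int × (Int × Int) × Int)] = [] := by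
            simp [List.filter, hb]
          cases hfe : E.find? (fun e => e.2.2 == pvMd E) <;>
            simp [List.find?_append, List.filter_append, hfind1, hfilt1, hfe, h3]

-- ===== VERDICT (by name: the statement is the Claim_ definition above) =====
theorem get_min_neighbors_spec : Claim_equal_get_min_neighbors := by
  intro maze cell iv _ _
  unfold Spec_get_min_neighbors
  rw [pvA_eq, pvB_eq]
  rw [show PySem.List.pyRange 0 4 1 = [0, 1, 2, 3] from by decide]
  simp only [List.foldl_cons, List.foldl_nil, pvFilterMap_cons, List.filterMap_nil]
  rw [show ((10000 : Int), (-1 : Int), ([] : List (Int × Int)), ([] : List (Int × Int))) = pvAgg [] from by decide]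
  rw [pvStep_eq _ _ _ _ _ _ (Or.inl rfl),
    pvStep_eq _ _ _ _ _ _ (Or.inr (Or.inl rfl)),
    pvStep_eq _ _ _ _ _ _ (Or.inr (Or.inr (Or.inl rfl))),
    pvStep_eq _ _ _ _ _ _ (Or.inr (Or.inr (Or.inr rfl)))]
  simp [List.append_assoc]
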